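-- pv_equiv track=rewrite | github.com/mrogo22/PRISM | src/pysubgroup extensions/array_target.py | has_negative_to_positive_transition
-- ===== SOURCE A (Python) =====
-- def has_negative_to_positive_transition(array):
--     """
--     Checks if the array has a transition from negative to positive values
--     without returning to negative.
--     """
--     seen_positive = False  # Tracks if we have encountered positive numbers
--     for value in array:
--         if value < 0:
--             if seen_positive:
--                 return False  # Encountered a negative number after a positive
--         elif value > 0:
--             seen_positive = True  # Start tracking positive numbers
--         else:
--             return False  # Zero is not allowed
--     # Ensure the array has at least one negative and one positive number
--     return seen_positive and array[0] < 0
-- ===== SOURCE B (Python) =====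
-- def has_negative_to_positive_transition(array):
--     n = len(array)
--     i = 0
--     while i < n and array[i] < 0:
--         i += 1
--     if i == 0 or i == n:
--         return False
--     return all(x > 0 for x in array[i:])
-- ===== Notes on version B (the rewrite author's own statement) =====
-- stated objective: alternative
-- what changed: Replaces the single stateful scan with a seen_positive flag and trailing array[0] check by a two-phase scan: advance past the leading run of strictly-negative elements, reject if that run is empty or covers the whole list, then check that every remaining element is strictly positive.
import Mathlib
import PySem

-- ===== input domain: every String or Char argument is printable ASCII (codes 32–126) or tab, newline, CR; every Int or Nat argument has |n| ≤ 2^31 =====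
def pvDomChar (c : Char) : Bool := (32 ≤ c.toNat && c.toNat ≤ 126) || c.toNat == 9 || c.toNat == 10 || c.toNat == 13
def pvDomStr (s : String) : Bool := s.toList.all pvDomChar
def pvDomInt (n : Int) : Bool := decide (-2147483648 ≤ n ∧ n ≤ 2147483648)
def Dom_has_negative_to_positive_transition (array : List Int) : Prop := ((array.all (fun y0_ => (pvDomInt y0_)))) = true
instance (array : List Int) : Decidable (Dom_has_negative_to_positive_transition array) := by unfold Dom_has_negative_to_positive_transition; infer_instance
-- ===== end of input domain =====

-- B replaces A's one-pass flag scan by a two-phase scan (leading-negative run, then all-positive check); alternative decomposition, same cost.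

-- ===== PORT A =====
-- A's for-loop with early returns: `none` = an early `return False`; `some seen` = loop completed with that flag.
def pvALoop : List Int → Bool → Option Bool
  | [], seen => some seen
  | v :: rest, seen =>
    if v < 0 then (if seen then none else pvALoop rest seen)
    else if v > 0 then pvALoop rest true
    else none

def has_negative_to_positive_transition (array : List Int) : Bool :=
  match pvALoop array false with
  | none => false
  | some seen =>
    -- `seen and array[0] < 0`: Python short-circuits, so array[0] is only read when seen = true (array then nonempty)
    seen && (match PySem.List.pyGet? array 0 with
             | some x => decide (x < 0)
             | none => false)

-- ===== PORT B =====
-- length of the leading strictly-negative run (Source B's while loop advancing i)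
def pvLead : List Int → Nat
  | [] => 0
  | x :: rest => if x < 0 then pvLead rest + 1 else 0

def has_negative_to_positive_transition_alt (array : List Int) : Bool :=
  let n := array.length
  let i := pvLead array
  if i == 0 || i == n then false
  else (array.drop i).all (fun x => decide (x > 0))   -- array[i:] with 0 ≤ i ≤ n is List.drop i

-- ===== PRECONDITION & SPEC =====
def Spec_has_negative_to_positive_transition (array : List Int) (out : Bool) : Prop := out = has_negative_to_positive_transition_alt array
instance (array : List Int) (out : Bool) : Decidable (Spec_has_negative_to_positive_transition array out) := by unfold Spec_has_negative_to_positive_transition; infer_instance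

-- ===== CLAIM (what is proved, stated in full; the proofs are below) =====
def Claim_equal_has_negative_to_positive_transition : Prop := ∀ (array : List Int), Dom_has_negative_to_positive_transition array → Spec_has_negative_to_positive_transition array (has_negative_to_positive_transition array)

-- ===== LEMMAS AND PROOFS =====

-- once seen_positive is true, A's loop completes with `some true` iff every remaining element is strictly positive
theorem pvALoop_true (xs : List Int) :
    (match pvALoop xs true with | none => false | some s => s)
      = xs.all (fun x => decide (x > 0)) := by
  induction xs with
  | nil => simp [pvALoop]
  | cons y ys ih =>
    by_cases hy : y < 0
    · simp [pvALoop, hy]; omega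
    · by_cases hp : y > 0
      · simpa [pvALoop, hy, hp] using ih
      · simp [pvALoop, hy, hp]

theorem pvLead_le (xs : List Int) : pvLead xs ≤ xs.length := by
  induction xs with
  | nil => simp [pvLead]
  | cons z zs ih => by_cases hz : z < 0 <;> simp [pvLead, hz] <;> omega

-- core: A's loop started with seen = false matches B's two-phase check on the tail that follows a negative head
theorem pvALoop_false (xs : List Int) :
    (match pvALoop xs false with | none => false | some s => s)
      = (if pvLead xs = xs.length then false
         else (xs.drop (pvLead xs)).all (fun x => decide (x > 0))) := by
  induction xs with
  | nil => simp [pvALoop, pvLead]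
  | cons y ys ih =>
    by_cases hy : y < 0
    · have hlen : pvLead (y :: ys) = pvLead ys + 1 := by simp [pvLead, hy]
      have hle : pvLead ys ≤ ys.length := pvLead_le ys
      simpa [pvALoop, hy, hlen, List.drop_succ_cons] using ih
    · by_cases hp : y > 0
      · have h0 : pvLead (y :: ys) = 0 := by simp [pvLead, hy]
        have := pvALoop_true ys
        simp [pvALoop, hy, hp, h0, List.all_cons, this]
      · have hz : y = 0 := by omega
        subst hz
        simp [pvALoop, pvLead]

-- ===== VERDICT (by name: the statement is the Claim_ definition above) =====
theorem has_negative_to_positive_transition_spec : Claim_equal_has_negative_to_positive_transition := by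
  intro array _
  unfold Spec_has_negative_to_positive_transition
  cases array with
  | nil => decide
  | cons x rest =>
    by_cases hx : x < 0
    · have hlen : pvLead (x :: rest) = pvLead rest + 1 := by simp [pvLead, hx]
      have hA : has_negative_to_positive_transition (x :: rest)
          = (match pvALoop rest false with | none => false | some s => s) := by
        unfold has_negative_to_positive_transition
        cases h : pvALoop rest false with
        | none => simp [pvALoop, hx, h]
        | some s =>
          simp [pvALoop, hx, h, PySem.List.pyGet?, PySem.List.pyIdx?]
      rw [hA, pvALoop_false]
      unfold has_negative_to_positive_transition_alt
      simp only [hlen, List.length_cons, List.drop_succ_cons]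
      by_cases he : pvLead rest = rest.length <;> simp [he]
    · by_cases hp : x > 0
      · have hA : has_negative_to_positive_transition (x :: rest) = false := by
          unfold has_negative_to_positive_transition
          cases h : pvALoop (x :: rest) false with
          | none => simp
          | some s =>
            simp [PySem.List.pyGet?, PySem.List.pyIdx?]
            omega
        have hB : has_negative_to_positive_transition_alt (x :: rest) = false := by
          unfold has_negative_to_positive_transition_alt
          simp [pvLead, hx]
        rw [hA, hB]
      · have hz : x = 0 := by omega
        subst hz
        have hA : has_negative_to_positive_transition (0 :: rest) = false := by
          unfold has_negative_to_positive_transition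
          simp [pvALoop]
        have hB : has_negative_to_positive_transition_alt (0 :: rest) = false := by
          unfold has_negative_to_positive_transition_alt
          simp [pvLead]
        rw [hA, hB]
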